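-- pv_equiv track=rewrite | github.com/henryshughes/nba_wingspan_analysis | nbadata.py | count_numbers_in_range
-- ===== SOURCE A (Python) =====
-- def count_numbers_in_range(numbers_list, range_start, range_end, interval=1):
--     count_list = []
--     for i in range(range_start, range_end+1, interval):
--         count = 0
--         for j in numbers_list:
--             if i <= j < i+interval:
--                 count += 1
--         count_list.append(count)
--     return count_list
-- ===== SOURCE B (Python) =====
-- def count_numbers_in_range(numbers_list, range_start, range_end, interval=1):
--     counts = [0] * len(range(range_start, range_end + 1, interval))
--     if interval > 0:
--         for j in numbers_list:
--             k = (j - range_start) // interval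
--             if 0 <= k < len(counts):
--                 counts[k] += 1
--     return counts
-- ===== Notes on version B (the rewrite author's own statement) =====
-- stated objective: alternative
-- what changed: Replaced the per-bucket rescan of the whole list (one inner pass over numbers_list for every range step) by a single pass over numbers_list that scatters each element into a preallocated count array at index (j - range_start) // interval; it trades A's repeated scans for one scatter pass with a division per element.
import Mathlib
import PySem

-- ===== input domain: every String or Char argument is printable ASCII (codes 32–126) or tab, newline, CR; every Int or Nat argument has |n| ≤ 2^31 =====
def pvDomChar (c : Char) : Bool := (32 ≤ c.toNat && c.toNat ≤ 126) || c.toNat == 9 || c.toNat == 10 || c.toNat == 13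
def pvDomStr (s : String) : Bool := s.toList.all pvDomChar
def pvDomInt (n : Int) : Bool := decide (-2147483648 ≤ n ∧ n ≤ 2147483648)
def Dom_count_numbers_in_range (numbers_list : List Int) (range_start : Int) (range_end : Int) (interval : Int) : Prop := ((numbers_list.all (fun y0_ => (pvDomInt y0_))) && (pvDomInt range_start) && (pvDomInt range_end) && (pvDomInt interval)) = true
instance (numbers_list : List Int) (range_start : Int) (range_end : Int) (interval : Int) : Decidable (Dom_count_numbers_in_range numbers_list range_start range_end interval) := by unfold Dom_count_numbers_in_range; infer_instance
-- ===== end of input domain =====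

-- B replaces A's per-bucket rescan of numbers_list by a single scatter pass into a
-- preallocated count array (index (j - range_start) // interval): an alternative
-- bucketing algorithm, not measured faster on the benchmark inputs.


-- ===== PORT A =====
def count_numbers_in_range (numbers_list : List Int) (range_start : Int) (range_end : Int) (interval : Int) : List Int :=
  (PySem.List.pyRange range_start (range_end + 1) interval).foldl
    (fun count_list i =>
      count_list ++ [numbers_list.foldl
        (fun count j => if i ≤ j ∧ j < i + interval then count + 1 else count) 0])
    []

-- ===== PORT B =====
def count_numbers_in_range_alt (numbers_list : List Int) (range_start : Int) (range_end : Int) (interval : Int) : List Int :=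
  let n := (PySem.List.pyRange range_start (range_end + 1) interval).length
  let counts : List Int := List.replicate n 0
  if 0 < interval then
    numbers_list.foldl
      (fun cs j =>
        let k := PySem.Int.floordiv (j - range_start) interval
        if 0 ≤ k ∧ k < (n : Int) then cs.set k.toNat (cs.getD k.toNat 0 + 1) else cs)
      counts
  else counts

-- ===== PRECONDITION & SPEC =====
-- Pre_ excludes exactly interval = 0, where Python's range(..., 0) raises ValueError in both A and B.
def Pre_count_numbers_in_range (numbers_list : List Int) (range_start : Int) (range_end : Int) (interval : Int) : Prop := interval ≠ 0
instance (numbers_list : List Int) (range_start : Int) (range_end : Int) (interval : Int) : Decidable (Pre_count_numbers_in_range numbers_list range_start range_end interval) := by unfold Pre_count_numbers_in_range; infer_instance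

def pvWitness_count_numbers_in_range : List Int × Int × Int × Int := ([1, 2, 3, 7], 0, 4, 2)

def Spec_count_numbers_in_range (numbers_list : List Int) (range_start : Int) (range_end : Int) (interval : Int) (out : List Int) : Prop := out = count_numbers_in_range_alt numbers_list range_start range_end interval
instance (numbers_list : List Int) (range_start : Int) (range_end : Int) (interval : Int) (out : List Int) : Decidable (Spec_count_numbers_in_range numbers_list range_start range_end interval out) := by unfold Spec_count_numbers_in_range; infer_instance

-- ===== CLAIM (what is proved, stated in full; the proofs are below) =====
def Claim_equal_count_numbers_in_range : Prop := ∀ (numbers_list : List Int) (range_start : Int) (range_end : Int) (interval : Int), Dom_count_numbers_in_range numbers_list range_start range_end interval → Pre_count_numbers_in_range numbers_list range_start range_end interval → Spec_count_numbers_in_range numbers_list range_start range_end interval (count_numbers_in_range numbers_list range_start range_end interval)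

-- ===== LEMMAS AND PROOFS =====

-- A's outer loop appends one element per range step: it is a map.
theorem pvFoldlAppendMap (f : Int → Int) :
    ∀ (xs : List Int) (init : List Int),
      xs.foldl (fun acc i => acc ++ [f i]) init = init ++ xs.map f := by
  intro xs
  induction xs with
  | nil => intro init; simp
  | cons x xs ih => intro init; simp [List.foldl_cons, ih]

-- A's inner loop counts the matching elements.
theorem pvFoldlCount (p : Int → Prop) [DecidablePred p] :
    ∀ (l : List Int) (c : Int),
      l.foldl (fun count j => if p j then count + 1 else count) c
        = c + (l.countP (fun j => decide (p j)) : Int) := by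
  intro l
  induction l with
  | nil => intro c; simp
  | cons x l ih =>
      intro c
      by_cases hx : p x <;> simp [List.foldl_cons, hx, ih] <;> ring

-- entries of the zero-initialised count array
theorem pvGetDRepl (N m : Nat) : (List.replicate N (0 : Int)).getD m 0 = 0 := by
  simp only [List.getD_eq_getElem?_getD, List.getElem?_replicate]
  split <;> rfl

-- B's scatter pass, characterized pointwise: entry m ends up as its start value
-- plus the number of elements whose bucket index is m.
theorem pvScatter (start iv : Int) (n : Nat) :
    ∀ (l : List Int) (cs : List Int), cs.length = n →
      l.foldl
        (fun cs j =>
          let k := PySem.Int.floordiv (j - start) iv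
          if 0 ≤ k ∧ k < (n : Int) then cs.set k.toNat (cs.getD k.toNat 0 + 1) else cs)
        cs
      = (List.range n).map
          (fun m => cs.getD m 0
            + (l.countP (fun j => decide (PySem.Int.floordiv (j - start) iv = (m : Int))) : Int)) := by
  intro l
  induction l with
  | nil =>
      intro cs hcs
      simp only [List.foldl_nil, List.countP_nil]
      refine List.ext_getElem (by simp [hcs]) ?_
      intro m h1 h2
      simp [List.getD_eq_getElem?_getD, List.getElem?_eq_getElem h1]
  | cons x l ih =>
      intro cs hcs
      rw [List.foldl_cons]
      set k := PySem.Int.floordiv (x - start) iv with hk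
      by_cases hin : 0 ≤ k ∧ k < (n : Int)
      · have hlen : (cs.set k.toNat (cs.getD k.toNat 0 + 1)).length = n := by simp [hcs]
        rw [if_pos hin, ih _ hlen]
        refine List.map_congr_left ?_
        intro m hm
        have hmn : m < n := List.mem_range.mp hm
        have hkn : k.toNat < n := by omega
        rw [List.countP_cons]
        by_cases hmk : m = k.toNat
        · have hupd : (cs.set k.toNat (cs.getD k.toNat 0 + 1)).getD m 0
              = cs.getD m 0 + 1 := by
            rw [hmk]
            simp [List.getD_eq_getElem?_getD, show k.toNat < cs.length by omega]
          have hpk : PySem.Int.floordiv (x - start) iv = (m : Int) := by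
            rw [← hk]; omega
          rw [hupd]
          simp only [hpk, decide_true]
          push_cast
          ring
        · have hupd : (cs.set k.toNat (cs.getD k.toNat 0 + 1)).getD m 0
              = cs.getD m 0 := by
            simp [List.getD_eq_getElem?_getD,
              List.getElem?_set_ne (fun h : k.toNat = m => hmk h.symm)]
          have hpk : ¬ (PySem.Int.floordiv (x - start) iv = (m : Int)) := by
            rw [← hk]; omega
          rw [hupd]
          simp [hpk]
      · rw [if_neg hin, ih _ hcs]
        refine List.map_congr_left ?_
        intro m hm
        have hmn : m < n := List.mem_range.mp hm
        have hpk : ¬ (PySem.Int.floordiv (x - start) iv = (m : Int)) := by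
          rw [← hk]; omega
        simp [hpk]

-- ===== VERDICT (by name: the statement is the Claim_ definition above) =====
theorem count_numbers_in_range_spec : Claim_equal_count_numbers_in_range := by
  intro numbers_list range_start range_end interval _ hpre
  unfold Spec_count_numbers_in_range count_numbers_in_range count_numbers_in_range_alt
  rcases lt_or_gt_of_ne hpre with hneg | hpos
  · -- interval < 0: every bucket [i, i+interval) is empty, both sides are all zeros
    rw [if_neg (by omega)]
    rw [pvFoldlAppendMap]
    rw [List.nil_append]
    refine List.ext_getElem (by simp) ?_
    intro m h1 h2
    simp only [List.getElem_map, List.getElem_replicate]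
    rw [pvFoldlCount (fun j => _ ≤ j ∧ j < _ + interval)]
    have : (PySem.List.pyRange range_start (range_end + 1) interval)[m]'(by simpa using h1) ∈
        PySem.List.pyRange range_start (range_end + 1) interval := List.getElem_mem _
    rw [List.countP_eq_zero.mpr ?_]
    · simp
    · intro j _
      simp only [decide_eq_true_eq]
      omega
  · -- interval > 0
    rw [if_pos hpos]
    rw [pvFoldlAppendMap, List.nil_append]
    rw [pvScatter range_start interval
      ((PySem.List.pyRange range_start (range_end + 1) interval).length) numbers_list
      (List.replicate (PySem.List.pyRange range_start (range_end + 1) interval).length 0)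
      (by simp)]
    rw [PySem.List.pyRange_of_pos range_start (range_end + 1) hpos]
    simp only [List.length_map, List.length_range, List.map_map]
    refine List.map_congr_left ?_
    intro m hm
    simp only [Function.comp_apply]
    rw [pvFoldlCount (fun j => range_start + interval * (m : Int) ≤ j ∧ j < range_start + interval * (m : Int) + interval)]
    rw [pvGetDRepl, Int.zero_add, Int.zero_add]
    congr 1
    refine List.countP_congr ?_
    intro j _
    simp only [decide_eq_true_eq]
    rw [PySem.Int.floordiv_eq_iff_of_pos hpos]
    constructor
    · rintro ⟨h1, h2⟩; constructor <;> nlinarith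
    · rintro ⟨h1, h2⟩; constructor <;> nlinarith
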